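-- pv_equiv track=rewrite | github.com/disouzam/op-desafios | desafio-12/disouzam/python/potencias_de_2.py | processa_candidatos
-- ===== SOURCE A (Python) =====
-- def processa_candidatos(lista_de_candidatos) -> list[str]:
--     resultados: list[str] = []
--
--     for candidato in lista_de_candidatos:
--         potencia_de_2, expoente = descobre_expoente(candidato)
--         if potencia_de_2:
--             resultado = f"{candidato} {str(potencia_de_2).lower()} {expoente}"
--         else:
--             resultado = f"{candidato} {str(potencia_de_2).lower()}"
--         resultados.append(resultado)
--
--     return resultados
--
-- def descobre_expoente(candidato: int) -> tuple[bool, int]: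
--
--     if candidato == 0:
--         return False, -1
--
--     if candidato == 1:
--         return True, 0
--
--     resultado = 2
--     potencia_de_2 = True
--     expoente = 1
--
--     while resultado < candidato:
--         resultado = resultado * 2
--         expoente += 1
--
--     if resultado > candidato:
--         potencia_de_2 = False
--         expoente = -1
--
--     return potencia_de_2, expoente
-- ===== SOURCE B (Python) =====
-- def descobre_expoente(candidato):
--     # factor out twos instead of building powers upward
--     if candidato <= 0:
--         return False, -1
--     n = candidato
--     expoente = 0
--     while n % 2 == 0:
--         n //= 2
--         expoente += 1
--     if n == 1:
--         return True, expoente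
--     return False, -1
--
--
-- def processa_candidatos(lista_de_candidatos) -> list[str]:
--     return [
--         f"{c} true {e}" if p else f"{c} false"
--         for c in lista_de_candidatos
--         for (p, e) in [descobre_expoente(c)]
--     ]
-- ===== Notes on version B (the rewrite author's own statement) =====
-- stated objective: simpler
-- what changed: descobre_expoente now factors out twos (repeated floor-division of the candidate down to its odd part, counting divisions) instead of building powers of two upward until they reach the candidate, and processa_candidatos becomes a single comprehension/map instead of an accumulator loop.
import Mathlib
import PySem

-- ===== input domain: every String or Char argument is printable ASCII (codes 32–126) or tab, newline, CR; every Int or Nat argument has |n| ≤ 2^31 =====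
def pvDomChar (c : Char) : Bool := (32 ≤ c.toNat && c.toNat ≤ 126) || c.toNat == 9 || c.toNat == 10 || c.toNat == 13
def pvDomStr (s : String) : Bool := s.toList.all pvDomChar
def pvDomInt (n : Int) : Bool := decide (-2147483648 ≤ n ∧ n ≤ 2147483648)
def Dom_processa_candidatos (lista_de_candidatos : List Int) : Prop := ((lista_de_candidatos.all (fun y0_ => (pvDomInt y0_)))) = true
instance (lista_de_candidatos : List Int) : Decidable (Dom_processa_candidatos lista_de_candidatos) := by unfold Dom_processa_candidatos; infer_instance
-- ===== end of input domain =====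

-- B replaces A's build-powers-upward-and-compare loop by factoring out twos (repeated
-- division down to 1, counting the divisions); objective: simpler/alternative, not faster.

-- ===== PORT A =====
-- str(b).lower() for a Python bool
def pyBoolStr (b : Bool) : String := if b then "true" else "false"

-- 'while resultado < candidato: resultado *= 2; expoente += 1'
def descobreLoop (candidato resultado expoente : Int) (hr : 0 < resultado) : Int × Int :=
  if _h : resultado < candidato then
    descobreLoop candidato (resultado * 2) (expoente + 1) (by omega)
  else (resultado, expoente)
termination_by (candidato - resultado).toNat
decreasing_by omega

def descobre_expoente (candidato : Int) : Bool × Int :=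
  if candidato = 0 then (false, -1)
  else if candidato = 1 then (true, 0)
  else
    let re := descobreLoop candidato 2 1 (by norm_num)
    if re.1 > candidato then (false, -1) else (true, re.2)

def processa_candidatos (lista_de_candidatos : List Int) : List String :=
  lista_de_candidatos.foldl
    (fun resultados candidato =>
      let pe := descobre_expoente candidato
      let resultado :=
        if pe.1 then
          PySem.Int.toStr candidato ++ " " ++ pyBoolStr pe.1 ++ " " ++ PySem.Int.toStr pe.2
        else
          PySem.Int.toStr candidato ++ " " ++ pyBoolStr pe.1
      resultados ++ [resultado]) []

-- ===== PORT B =====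
-- 'while n % 2 == 0: n //= 2; expoente += 1'
def divideLoop (n expoente : Int) (hn : 0 < n) : Int × Int :=
  if _h : PySem.Int.mod n 2 = 0 then
    divideLoop (PySem.Int.floordiv n 2) (expoente + 1)
      (by
        rw [PySem.Int.floordiv_eq_ediv_of_pos (by norm_num)]
        rw [PySem.Int.mod_eq_emod_of_pos (by norm_num)] at _h
        omega)
  else (n, expoente)
termination_by n.toNat
decreasing_by
  rw [PySem.Int.floordiv_eq_ediv_of_pos (by norm_num)]
  rw [PySem.Int.mod_eq_emod_of_pos (by norm_num)] at _h
  omega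

def descobre_expoente_alt (candidato : Int) : Bool × Int :=
  if _h : candidato ≤ 0 then (false, -1)
  else
    let ne := divideLoop candidato 0 (by omega)
    if ne.1 = 1 then (true, ne.2) else (false, -1)

def processa_candidatos_alt (lista_de_candidatos : List Int) : List String :=
  lista_de_candidatos.map (fun c =>
    let pe := descobre_expoente_alt c
    if pe.1 then PySem.Int.toStr c ++ " true " ++ PySem.Int.toStr pe.2
    else PySem.Int.toStr c ++ " false")

-- ===== PRECONDITION & SPEC =====
def Spec_processa_candidatos (lista_de_candidatos : List Int) (out : List String) : Prop := out = processa_candidatos_alt lista_de_candidatos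
instance (lista_de_candidatos : List Int) (out : List String) : Decidable (Spec_processa_candidatos lista_de_candidatos out) := by unfold Spec_processa_candidatos; infer_instance

-- ===== CLAIM (what is proved, stated in full; the proofs are below) =====
def Claim_equal_processa_candidatos : Prop := ∀ (lista_de_candidatos : List Int), Dom_processa_candidatos lista_de_candidatos → Spec_processa_candidatos lista_de_candidatos (processa_candidatos lista_de_candidatos)

-- ===== LEMMAS AND PROOFS =====

-- exact exponent of a power of two (reference for both loops)
def log2? (n : Nat) : Option Nat :=
  if n = 0 then none
  else if n = 1 then some 0
  else if n % 2 = 0 then (log2? (n / 2)).map (· + 1) else none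
termination_by n
decreasing_by omega

theorem log2?_pow (k : Nat) : log2? (2 ^ k) = some k := by
  induction k with
  | zero => rw [log2?.eq_def]; norm_num
  | succ k ih =>
    rw [log2?.eq_def]
    have h1 : 2 ^ (k + 1) ≠ 0 := by positivity
    have h2 : 2 ^ (k + 1) ≠ 1 := by
      have : 2 ≤ 2 ^ (k + 1) := Nat.one_lt_two_pow (by omega)
      omega
    have h3 : 2 ^ (k + 1) % 2 = 0 := by
      simp [pow_succ, Nat.mul_mod_left]
    have h4 : 2 ^ (k + 1) / 2 = 2 ^ k := by
      rw [pow_succ]; omega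
    simp [h3, h4, ih]

theorem log2?_some (n : Nat) : ∀ k : Nat, log2? n = some k → n = 2 ^ k := by
  induction n using Nat.strong_induction_on with
  | _ n ih =>
    intro k h
    rw [log2?.eq_def] at h
    split_ifs at h with h0 h1 h2
    · obtain rfl : (0 : Nat) = k := Option.some.inj h
      simpa using h1
    · rw [Option.map_eq_some_iff] at h
      obtain ⟨k', hk', rfl⟩ := h
      have := ih (n / 2) (by omega) k' hk'
      rw [pow_succ]
      omega

theorem divideLoop_some (n e : Int) (hn : 0 < n) :
    ∀ k : Nat, log2? n.toNat = some k → divideLoop n e hn = (1, e + (k : Int)) := by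
  fun_induction divideLoop n e hn with
  | case1 n e hn heven ih =>
    intro k h
    have hmod : n % 2 = 0 := by
      rw [PySem.Int.mod_eq_emod_of_pos (by norm_num)] at heven; exact heven
    have hn2 : (2 : Int) ≤ n := by omega
    have hfd : PySem.Int.floordiv n 2 = n / 2 :=
      PySem.Int.floordiv_eq_ediv_of_pos (by norm_num)
    have htn : n.toNat ≠ 0 := by omega
    have htn1 : n.toNat ≠ 1 := by omega
    have htne : n.toNat % 2 = 0 := by omega
    rw [log2?.eq_def] at h
    simp [htn, htn1, htne, Option.map_eq_some_iff] at h
    obtain ⟨k', hk', rfl⟩ := h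
    have hdivnat : (PySem.Int.floordiv n 2).toNat = n.toNat / 2 := by
      rw [hfd]; omega
    rw [ih k' (by rw [hdivnat]; exact hk')]
    simp only [Prod.mk.injEq, true_and]
    push_cast; ring
  | case2 n e hn hodd =>
    intro k h
    have hmod : n % 2 ≠ 0 := by
      rw [PySem.Int.mod_eq_emod_of_pos (by norm_num)] at hodd; exact hodd
    have htn1 : n.toNat = 1 := by
      by_contra hne
      have htn : n.toNat ≠ 0 := by omega
      have htno : n.toNat % 2 ≠ 0 := by omega
      rw [log2?.eq_def] at h
      simp [htn, hne, htno] at h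
    have hn1 : n = 1 := by omega
    have hk : (0 : Nat) = k := by rw [log2?.eq_def, htn1] at h; simpa using h
    simp [hn1, ← hk]

theorem divideLoop_none (n e : Int) (hn : 0 < n) :
    log2? n.toNat = none → (divideLoop n e hn).1 ≠ 1 := by
  fun_induction divideLoop n e hn with
  | case1 n e hn heven ih =>
    intro h
    have hmod : n % 2 = 0 := by
      rw [PySem.Int.mod_eq_emod_of_pos (by norm_num)] at heven; exact heven
    have hn2 : (2 : Int) ≤ n := by omega
    have hfd : PySem.Int.floordiv n 2 = n / 2 :=
      PySem.Int.floordiv_eq_ediv_of_pos (by norm_num)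
    have htn : n.toNat ≠ 0 := by omega
    have htn1 : n.toNat ≠ 1 := by omega
    have htne : n.toNat % 2 = 0 := by omega
    have hdivnat : (PySem.Int.floordiv n 2).toNat = n.toNat / 2 := by
      rw [hfd]; omega
    apply ih
    rw [log2?.eq_def] at h
    simp [htn, htn1, htne, Option.map_eq_none_iff] at h
    rw [hdivnat]; exact h
  | case2 n e hn hodd =>
    intro h h1
    simp only at h1
    have : n.toNat = 1 := by omega
    rw [log2?.eq_def, this] at h
    simp at h

theorem descobreLoop_spec (c r e : Int) (hr : 0 < r) :
    (∃ j : Nat, 0 < j ∧ r = (2 : Int) ^ j ∧ e = (j : Int)) → r < 2 * c →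
    ∃ E : Nat, descobreLoop c r e hr = ((2 : Int) ^ E, (E : Int)) ∧
      c ≤ (2 : Int) ^ E ∧ (2 : Int) ^ E < 2 * c := by
  fun_induction descobreLoop c r e hr with
  | case1 r e hr h ih =>
    rintro ⟨j, hj, rfl, rfl⟩ _
    exact ih ⟨j + 1, by omega, by rw [pow_succ], by push_cast; ring⟩ (by omega)
  | case2 r e hr h =>
    rintro ⟨j, hj, rfl, rfl⟩ hlt
    exact ⟨j, rfl, by omega, hlt⟩

theorem descobre_eq (c : Int) : descobre_expoente c = descobre_expoente_alt c := by
  by_cases h0 : c = 0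
  · simp [descobre_expoente, descobre_expoente_alt, h0]
  by_cases h1 : c = 1
  · have hlog : log2? (1 : Int).toNat = some 0 := by rw [log2?.eq_def]; norm_num
    have hb := divideLoop_some 1 0 (by norm_num) 0 hlog
    subst h1
    simp [descobre_expoente, descobre_expoente_alt, hb]
  by_cases hneg : c ≤ 0
  · -- nonpositive candidate: A's loop exits at once with resultado = 2 > c
    rw [descobre_expoente, descobre_expoente_alt, descobreLoop]
    have hnl : ¬ ((2 : Int) < c) := by omega
    have hgt : (2 : Int) > c := by omega
    simp [h0, h1, hneg, hnl, hgt]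
  · -- c ≥ 2
    have hc2 : (2 : Int) ≤ c := by omega
    obtain ⟨E, hres, hle, hlt⟩ :=
      descobreLoop_spec c 2 1 (by norm_num) ⟨1, by norm_num⟩ (by omega)
    rw [descobre_expoente, descobre_expoente_alt]
    simp only [h0, h1, if_false, dif_neg hneg]
    rw [hres]
    have hpowcast : ((2 : Int) ^ E) = ((2 ^ E : Nat) : Int) := by push_cast; ring
    by_cases heq : (2 : Int) ^ E = c
    · -- c is exactly a power of two
      have hlog : log2? c.toNat = some E := by
        have : c.toNat = 2 ^ E := by rw [← heq, hpowcast]; omega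
        rw [this]; exact log2?_pow E
      rw [divideLoop_some c 0 (by omega) E hlog]
      simp [heq]
    · -- c lies strictly between two consecutive powers of two
      have hgt : c < (2 : Int) ^ E := lt_of_le_of_ne hle (fun h => heq h.symm)
      have hlog : log2? c.toNat = none := by
        cases hl : log2? c.toNat with
        | none => rfl
        | some k =>
          exfalso
          have hck : c.toNat = 2 ^ k := log2?_some _ k hl
          have hkc : c = ((2 ^ k : Nat) : Int) := by omega
          rw [hkc, hpowcast] at hgt hlt
          have hkE : (2 : Nat) ^ k < 2 ^ E := by exact_mod_cast hgt
          have hEk : (2 : Nat) ^ E < 2 * 2 ^ k := by exact_mod_cast hlt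
          rw [← pow_succ'] at hEk
          have h5 : k < E := (Nat.pow_lt_pow_iff_right (by norm_num)).mp hkE
          have h6 : E < k + 1 := (Nat.pow_lt_pow_iff_right (by norm_num)).mp hEk
          omega
      have hne := divideLoop_none c 0 (by omega) hlog
      simp only [gt_iff_lt, hgt, if_true]
      split
      · next hh => exact absurd hh hne
      · rfl

theorem elem_eq (c : Int) :
    (let pe := descobre_expoente c
     if pe.1 then
       PySem.Int.toStr c ++ " " ++ pyBoolStr pe.1 ++ " " ++ PySem.Int.toStr pe.2
     else PySem.Int.toStr c ++ " " ++ pyBoolStr pe.1) =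
    (let pe := descobre_expoente_alt c
     if pe.1 then PySem.Int.toStr c ++ " true " ++ PySem.Int.toStr pe.2
     else PySem.Int.toStr c ++ " false") := by
  simp only [descobre_eq c]
  cases hp : (descobre_expoente_alt c).1 <;>
    simp [pyBoolStr, String.append_assoc]

-- ===== VERDICT (by name: the statement is the Claim_ definition above) =====
theorem processa_candidatos_spec : Claim_equal_processa_candidatos := by
  intro l _
  unfold Spec_processa_candidatos processa_candidatos processa_candidatos_alt
  rw [PySem.List.foldl_append_singleton_eq_map]
  simp only [List.nil_append]
  exact List.map_congr_left (fun c _ => elem_eq c)
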